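-- pv_equiv track=rewrite | github.com/SMaster201/CNN | scripts/run_classic_cnn_cifar10.py | _strip_train_only_for_eval
-- ===== SOURCE A (Python) =====
-- _TRAIN_ONLY_FLAGS = frozenset({"--epochs", "--lr", "--val-ratio"})
--
-- def _strip_train_only_for_eval(argv: list[str]) -> list[str]:
--     """保留可傳給 eval_classifier 的參數（例如 --device、--batch-size）。"""
--     out: list[str] = []
--     i = 0
--     while i < len(argv):
--         tok = argv[i]
--         if tok in _TRAIN_ONLY_FLAGS:
--             i += 1
--             if i < len(argv) and not str(argv[i]).startswith("-"):
--                 i += 1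
--             continue
--         if tok.startswith("--") and "=" not in tok:
--             out.append(tok)
--             i += 1
--             if i < len(argv) and not str(argv[i]).startswith("-"):
--                 out.append(argv[i])
--                 i += 1
--         else:
--             out.append(tok)
--             i += 1
--     return out
-- ===== SOURCE B (Python) =====
-- _TRAIN_ONLY_FLAGS = frozenset({"--epochs", "--lr", "--val-ratio"})
--
-- def _strip_train_only_for_eval(argv):
--     """State machine over the token stream: 'pending' remembers whether the
--     previous token opened a value slot to skip or to keep."""
--     out = []
--     pending = None  # None | 'skip' | 'keep'
--     for tok in argv:
--         if pending is not None:
--             if not str(tok).startswith("-"):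
--                 if pending == 'keep':
--                     out.append(tok)
--                 pending = None
--                 continue
--             pending = None
--         if tok in _TRAIN_ONLY_FLAGS:
--             pending = 'skip'
--         elif tok.startswith("--") and "=" not in tok:
--             out.append(tok)
--             pending = 'keep'
--         else:
--             out.append(tok)
--     return out
-- ===== Notes on version B (the rewrite author's own statement) =====
-- stated objective: alternative
-- what changed: Replaces A's index-based while loop with explicit lookahead at argv[i+1] by a single forward for-loop state machine that carries a 'pending' value-slot state (None/skip/keep) across tokens.
import Mathlib
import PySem

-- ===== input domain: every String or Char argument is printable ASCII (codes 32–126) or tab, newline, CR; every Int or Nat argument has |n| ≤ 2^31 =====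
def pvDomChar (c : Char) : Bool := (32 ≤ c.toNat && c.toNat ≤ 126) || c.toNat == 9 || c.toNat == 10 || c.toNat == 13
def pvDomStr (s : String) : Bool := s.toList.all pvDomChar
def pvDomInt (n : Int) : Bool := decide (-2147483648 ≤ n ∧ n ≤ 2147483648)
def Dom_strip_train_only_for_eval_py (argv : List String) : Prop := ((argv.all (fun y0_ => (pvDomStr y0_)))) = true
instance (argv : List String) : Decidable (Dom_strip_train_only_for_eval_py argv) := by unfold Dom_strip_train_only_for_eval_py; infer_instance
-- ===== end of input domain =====

-- B replaces A's index-with-lookahead while-loop by a single forward pass with a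
-- 'pending' state variable (objective: alternative decomposition, same cost).

-- ===== PORT A =====
-- tok in _TRAIN_ONLY_FLAGS
def pvIsTrainFlag (tok : String) : Bool :=
  tok == "--epochs" || tok == "--lr" || tok == "--val-ratio"

-- literal port of A's while loop, recursing on the suffix of argv at index i
def strip_train_only_for_eval_py (argv : List String) : List String :=
  match argv with
  | [] => []
  | tok :: rest =>
    if pvIsTrainFlag tok then
      match rest with
      | v :: rest' =>
        if !(PySem.Str.startswith v "-") then strip_train_only_for_eval_py rest'
        else strip_train_only_for_eval_py (v :: rest')
      | [] => strip_train_only_for_eval_py []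
    else if PySem.Str.startswith tok "--" && !(PySem.Str.isIn "=" tok) then
      tok ::
        (match rest with
         | v :: rest' =>
           if !(PySem.Str.startswith v "-") then v :: strip_train_only_for_eval_py rest'
           else strip_train_only_for_eval_py (v :: rest')
         | [] => strip_train_only_for_eval_py [])
    else tok :: strip_train_only_for_eval_py rest

-- ===== PORT B =====
-- fresh classification of a token (pending cleared): returns (new pending, new out)
def pvFreshB (acc : List String) (tok : String) : Option Bool × List String :=
  if pvIsTrainFlag tok then (some false, acc)
  else if PySem.Str.startswith tok "--" && !(PySem.Str.isIn "=" tok) then (some true, acc ++ [tok])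
  else (none, acc ++ [tok])

-- one step of B's for-loop; state = (pending, out); some true = 'keep', some false = 'skip'
def pvStepB (st : Option Bool × List String) (tok : String) : Option Bool × List String :=
  match st.1 with
  | some p =>
    if !(PySem.Str.startswith tok "-") then (none, if p then st.2 ++ [tok] else st.2)
    else pvFreshB st.2 tok
  | none => pvFreshB st.2 tok

def strip_train_only_for_eval_py_alt (argv : List String) : List String :=
  (argv.foldl pvStepB (none, [])).2

-- ===== PRECONDITION & SPEC =====
def Spec_strip_train_only_for_eval_py (argv : List String) (out : List String) : Prop := out = strip_train_only_for_eval_py_alt argv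
instance (argv : List String) (out : List String) : Decidable (Spec_strip_train_only_for_eval_py argv out) := by unfold Spec_strip_train_only_for_eval_py; infer_instance

-- ===== CLAIM (what is proved, stated in full; the proofs are below) =====
def Claim_equal_strip_train_only_for_eval_py : Prop := ∀ (argv : List String), Dom_strip_train_only_for_eval_py argv → Spec_strip_train_only_for_eval_py argv (strip_train_only_for_eval_py argv)

-- ===== LEMMAS AND PROOFS =====

-- B's fold from the neutral state, with any accumulated output, computes A's result.
theorem pvFoldB_eq_stripA : ∀ (n : Nat) (l : List String), l.length ≤ n →
    ∀ acc : List String, (l.foldl pvStepB (none, acc)).2 = acc ++ strip_train_only_for_eval_py l := by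
  intro n
  induction n with
  | zero =>
    intro l hl acc
    have : l = [] := List.eq_nil_of_length_eq_zero (Nat.le_zero.mp hl)
    subst this
    simp [strip_train_only_for_eval_py]
  | succ n ih =>
    intro l hl acc
    match l with
    | [] => simp [strip_train_only_for_eval_py]
    | tok :: rest =>
      by_cases hf : pvIsTrainFlag tok = true
      · -- train-only flag: skip it (and a following non-dash value)
        match rest with
        | [] =>
          simp [List.foldl, pvStepB, pvFreshB, hf, strip_train_only_for_eval_py]
        | v :: rest' =>
          by_cases hd : PySem.Str.startswith v "-" = true
            <;> simp at hd
          · -- dash in value position: reprocess v fresh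
            have h1 : (List.foldl pvStepB (none, acc) (tok :: v :: rest')).2
                = (List.foldl pvStepB (none, acc) (v :: rest')).2 := by
              simp [List.foldl, pvStepB, pvFreshB, hf, hd]
            have h2 := ih (v :: rest') (by simpa using Nat.le_of_succ_le_succ hl) acc
            rw [h1, h2]
            simp [strip_train_only_for_eval_py, hf, hd]
          · -- consume the value
            have h1 : (List.foldl pvStepB (none, acc) (tok :: v :: rest')).2
                = (List.foldl pvStepB (none, acc) rest').2 := by
              simp [List.foldl, pvStepB, pvFreshB, hf, hd]
            have h2 := ih rest'
              (Nat.le_trans (Nat.le_succ _) (by simpa using Nat.le_of_succ_le_succ hl)) acc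
            rw [h1, h2]
            simp [strip_train_only_for_eval_py, hf, hd]
      · by_cases hk : (PySem.Str.startswith tok "--" && !PySem.Str.isIn "=" tok) = true
        <;> simp at hk
        · -- long flag kept: keep it (and a following non-dash value)
          match rest with
          | [] =>
            simp [List.foldl, pvStepB, pvFreshB, hf, hk, strip_train_only_for_eval_py]
          | v :: rest' =>
            by_cases hd : PySem.Str.startswith v "-" = true
            <;> simp at hd
            · have h1 : (List.foldl pvStepB (none, acc) (tok :: v :: rest')).2
                  = (List.foldl pvStepB (none, acc ++ [tok]) (v :: rest')).2 := by
                simp [List.foldl, pvStepB, pvFreshB, hf, hk, hd]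
              have h2 := ih (v :: rest') (by simpa using Nat.le_of_succ_le_succ hl) (acc ++ [tok])
              rw [h1, h2]
              simp [strip_train_only_for_eval_py, hf, hk, hd]
            · have h1 : (List.foldl pvStepB (none, acc) (tok :: v :: rest')).2
                  = (List.foldl pvStepB (none, acc ++ [tok, v]) rest').2 := by
                simp [List.foldl, pvStepB, pvFreshB, hf, hk, hd]
              have h2 := ih rest'
                (Nat.le_trans (Nat.le_succ _) (by simpa using Nat.le_of_succ_le_succ hl)) (acc ++ [tok, v])
              rw [h1, h2]
              simp [strip_train_only_for_eval_py, hf, hk, hd]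
        · -- plain token: keep it
          have hk' : ¬(PySem.Chars.startswith tok.toList ['-', '-'] = true ∧
              PySem.Chars.isIn ['='] tok.toList = false) := fun h => by simp [hk h.1] at h
          have h1 : (List.foldl pvStepB (none, acc) (tok :: rest)).2
              = (List.foldl pvStepB (none, acc ++ [tok]) rest).2 := by
            simp [List.foldl, pvStepB, pvFreshB, hf, hk']
          have h2 := ih rest (Nat.le_of_succ_le_succ hl) (acc ++ [tok])
          rw [h1, h2]
          conv_rhs => rw [strip_train_only_for_eval_py.eq_def]
          simp [hf, hk']

-- ===== VERDICT (by name: the statement is the Claim_ definition above) =====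
theorem strip_train_only_for_eval_py_spec : Claim_equal_strip_train_only_for_eval_py := by
  intro argv _
  unfold Spec_strip_train_only_for_eval_py strip_train_only_for_eval_py_alt
  simpa using (pvFoldB_eq_stripA argv.length argv (Nat.le_refl _) []).symm
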